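-- pv_equiv track=rewrite | github.com/cmagganas/mlops-prop-mgmt | .github/scripts/add_type_hints.py | guess_return_type
-- ===== SOURCE A (Python) =====
-- def guess_return_type(func_name: str) -> str:
--     """Guess return type based on function name conventions."""
--     func_name = func_name.lower()
--
--     if any(func_name.startswith(prefix) for prefix in ["is_", "has_", "should_", "check_"]):
--         return "bool"
--     elif any(func_name.startswith(prefix) for prefix in ["get_", "fetch_", "retrieve_"]):
--         if any(substring in func_name for substring in ["list", "all"]):
--             return "List[Dict[str, Any]]"
--         else:
--             return "Dict[str, Any]"
--     elif any(func_name.startswith(prefix) for prefix in ["calculate_", "compute_"]):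
--         return "float"
--     elif any(func_name.startswith(prefix) for prefix in ["create_", "generate_"]):
--         return "Dict[str, Any]"
--     elif any(func_name.startswith(prefix) for prefix in ["update_", "modify_"]):
--         return "Dict[str, Any]"
--     elif any(func_name.startswith(prefix) for prefix in ["delete_", "remove_"]):
--         return "bool"
--     else:
--         return "Any"
-- ===== SOURCE B (Python) =====
-- # Different algorithm: instead of testing 13 startswith prefixes, split off the first
-- # underscore-delimited word once and classify it by set membership (first-word dispatch).
-- _BOOL = {"is", "has", "should", "check", "delete", "remove"}
-- _GET = {"get", "fetch", "retrieve"}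
-- _FLOAT = {"calculate", "compute"}
-- _DICT = {"create", "generate", "update", "modify"}
--
-- def guess_return_type(func_name: str) -> str:
--     s = func_name.lower()
--     head, sep, _rest = s.partition("_")
--     if not sep:
--         return "Any"
--     if head in _GET:
--         return "List[Dict[str, Any]]" if ("list" in s or "all" in s) else "Dict[str, Any]"
--     if head in _BOOL:
--         return "bool"
--     if head in _FLOAT:
--         return "float"
--     if head in _DICT:
--         return "Dict[str, Any]"
--     return "Any"
-- ===== Notes on version B (the rewrite author's own statement) =====
-- stated objective: alternative
-- what changed: Instead of testing thirteen underscore-terminated prefixes with startswith, B splits the lowercased name once at its first underscore (str.partition) and classifies the first word by membership in four sets, merging A's three Dict-returning groups and its two bool-returning groups.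
import Mathlib
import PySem

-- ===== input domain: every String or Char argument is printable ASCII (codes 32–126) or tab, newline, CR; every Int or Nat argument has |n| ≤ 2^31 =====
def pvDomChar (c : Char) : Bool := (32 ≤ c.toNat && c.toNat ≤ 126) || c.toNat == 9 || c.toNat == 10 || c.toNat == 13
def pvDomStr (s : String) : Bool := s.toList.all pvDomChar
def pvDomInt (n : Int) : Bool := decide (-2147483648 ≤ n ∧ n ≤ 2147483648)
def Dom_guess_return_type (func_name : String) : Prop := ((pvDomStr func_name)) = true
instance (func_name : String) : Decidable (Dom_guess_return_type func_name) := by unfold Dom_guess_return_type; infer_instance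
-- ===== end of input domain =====

-- B classifies the first underscore-delimited word by set membership instead of testing 13 startswith prefixes (alternative algorithm, same cost).


-- ===== PORT A =====
def guess_return_type (func_name : String) : String :=
  let f := PySem.Str.lower func_name
  if ["is_", "has_", "should_", "check_"].any (fun p => PySem.Str.startswith f p) then
    "bool"
  else if ["get_", "fetch_", "retrieve_"].any (fun p => PySem.Str.startswith f p) then
    if ["list", "all"].any (fun sub => PySem.Str.isIn sub f) then
      "List[Dict[str, Any]]"
    else
      "Dict[str, Any]"
  else if ["calculate_", "compute_"].any (fun p => PySem.Str.startswith f p) then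
    "float"
  else if ["create_", "generate_"].any (fun p => PySem.Str.startswith f p) then
    "Dict[str, Any]"
  else if ["update_", "modify_"].any (fun p => PySem.Str.startswith f p) then
    "Dict[str, Any]"
  else if ["delete_", "remove_"].any (fun p => PySem.Str.startswith f p) then
    "bool"
  else
    "Any"

-- ===== PORT B =====
-- the four word sets (Python frozensets; as distinct-element lists)
def pvBoolWords : List (List Char) := [['i','s'], ['h','a','s'], ['s','h','o','u','l','d'], ['c','h','e','c','k'], ['d','e','l','e','t','e'], ['r','e','m','o','v','e']]
def pvGetWords : List (List Char) := [['g','e','t'], ['f','e','t','c','h'], ['r','e','t','r','i','e','v','e']]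
def pvFloatWords : List (List Char) := [['c','a','l','c','u','l','a','t','e'], ['c','o','m','p','u','t','e']]
def pvDictWords : List (List Char) := [['c','r','e','a','t','e'], ['g','e','n','e','r','a','t','e'], ['u','p','d','a','t','e'], ['m','o','d','i','f','y']]

def guess_return_type_alt (func_name : String) : String :=
  let cs := PySem.Chars.lower func_name.toList
  -- head, sep, _rest = s.partition("_"); 'not sep' = no '_' in s
  if '_' ∈ cs then
    let head := cs.takeWhile (fun c => c ≠ '_')
    if pvGetWords.contains head then
      if PySem.Chars.isIn ['l','i','s','t'] cs || PySem.Chars.isIn ['a','l','l'] cs then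
        "List[Dict[str, Any]]"
      else
        "Dict[str, Any]"
    else if pvBoolWords.contains head then "bool"
    else if pvFloatWords.contains head then "float"
    else if pvDictWords.contains head then "Dict[str, Any]"
    else "Any"
  else "Any"

-- ===== PRECONDITION & SPEC =====
def Spec_guess_return_type (func_name : String) (out : String) : Prop := out = guess_return_type_alt func_name
instance (func_name : String) (out : String) : Decidable (Spec_guess_return_type func_name out) := by unfold Spec_guess_return_type; infer_instance

-- ===== CLAIM =====
def Claim_equal_guess_return_type : Prop := ∀ (func_name : String), Dom_guess_return_type func_name → Spec_guess_return_type func_name (guess_return_type func_name)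

-- ===== LEMMAS AND PROOFS =====

-- startswith with a pattern '<word>_' is exactly: the string contains '_' and its first word is w
lemma startswith_underscore_iff (cs w : List Char) (hw : '_' ∉ w) :
    PySem.Chars.startswith cs (w ++ ['_']) = true ↔ ('_' ∈ cs ∧ cs.takeWhile (fun c => c ≠ '_') = w) := by
  rw [PySem.Chars.startswith_iff]
  constructor
  · rintro ⟨rest, rfl⟩
    refine ⟨by simp, ?_⟩
    have hself : List.takeWhile (fun c => decide (c ≠ '_')) w = w :=
      List.takeWhile_eq_self_iff.mpr (fun x hx => by simp; rintro rfl; exact hw hx)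
    rw [List.append_assoc, List.singleton_append, List.takeWhile_append, hself]
    simp [List.takeWhile_cons_of_neg]
  · rintro ⟨hmem, hH⟩
    have hsplit := (List.takeWhile_append_dropWhile (p := fun c => decide (c ≠ '_')) (l := cs)).symm
    have hdrop_ne : cs.dropWhile (fun c => decide (c ≠ '_')) ≠ [] := by
      intro h
      rw [hsplit, h, List.append_nil] at hmem
      exact hw (hH ▸ hmem)
    obtain ⟨d, ds, hd⟩ := List.exists_cons_of_ne_nil hdrop_ne
    have hdeq : d = '_' := by
      have h2 : ∀ (h : cs.dropWhile (fun c => decide (c ≠ '_')) ≠ []),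
          (cs.dropWhile (fun c => decide (c ≠ '_'))).head h = d := by
        rw [hd]; intro _; rfl
      have h3 := List.head_dropWhile_not (fun c => decide (c ≠ '_')) hdrop_ne
      rw [h2 hdrop_ne] at h3
      simpa using h3
    exact ⟨ds, by rw [hsplit, hH, hd, hdeq]; simp⟩

lemma startswith_underscore_eq (cs w : List Char) (hw : '_' ∉ w) (hu : '_' ∈ cs) :
    PySem.Chars.startswith cs (w ++ ['_']) = decide (cs.takeWhile (fun c => c ≠ '_') = w) := by
  by_cases h : cs.takeWhile (fun c => c ≠ '_') = w
  · rw [(startswith_underscore_iff cs w hw).2 ⟨hu, h⟩, h]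
    simp
  · rw [decide_eq_false h, Bool.eq_false_iff]
    intro hc
    exact h ((startswith_underscore_iff cs w hw).1 hc).2

lemma startswith_underscore_false (cs w : List Char) (hu : '_' ∉ cs) :
    PySem.Chars.startswith cs (w ++ ['_']) = false := by
  rw [Bool.eq_false_iff]
  intro hc
  rw [PySem.Chars.startswith_iff] at hc
  obtain ⟨rest, rfl⟩ := hc
  exact hu (by simp)

-- ===== VERDICT =====
theorem guess_return_type_spec : Claim_equal_guess_return_type := by
  intro func_name _
  unfold Spec_guess_return_type guess_return_type guess_return_type_alt
  simp only [List.any_cons, List.any_nil, Bool.or_false, PySem.Str.startswith_eq,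
    PySem.Str.isIn_eq, PySem.Str.toList_lower]
  set cs := PySem.Chars.lower func_name.toList with hcs
  by_cases hu : '_' ∈ cs
  · have e : ∀ (w : List Char), '_' ∉ w →
        PySem.Chars.startswith cs (w ++ ['_']) = decide (cs.takeWhile (fun c => c ≠ '_') = w) :=
      fun w hw => startswith_underscore_eq cs w hw hu
    have e1 := e ['i','s'] (by decide)
    have e2 := e ['h','a','s'] (by decide)
    have e3 := e ['s','h','o','u','l','d'] (by decide)
    have e4 := e ['c','h','e','c','k'] (by decide)
    have e5 := e ['g','e','t'] (by decide)
    have e6 := e ['f','e','t','c','h'] (by decide)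
    have e7 := e ['r','e','t','r','i','e','v','e'] (by decide)
    have e8 := e ['c','a','l','c','u','l','a','t','e'] (by decide)
    have e9 := e ['c','o','m','p','u','t','e'] (by decide)
    have e10 := e ['c','r','e','a','t','e'] (by decide)
    have e11 := e ['g','e','n','e','r','a','t','e'] (by decide)
    have e12 := e ['u','p','d','a','t','e'] (by decide)
    have e13 := e ['m','o','d','i','f','y'] (by decide)
    have e14 := e ['d','e','l','e','t','e'] (by decide)
    have e15 := e ['r','e','m','o','v','e'] (by decide)
    simp only [
      show ("is_":String).toList = ['i','s'] ++ ['_'] from rfl,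
      show ("has_":String).toList = ['h','a','s'] ++ ['_'] from rfl,
      show ("should_":String).toList = ['s','h','o','u','l','d'] ++ ['_'] from rfl,
      show ("check_":String).toList = ['c','h','e','c','k'] ++ ['_'] from rfl,
      show ("get_":String).toList = ['g','e','t'] ++ ['_'] from rfl,
      show ("fetch_":String).toList = ['f','e','t','c','h'] ++ ['_'] from rfl,
      show ("retrieve_":String).toList = ['r','e','t','r','i','e','v','e'] ++ ['_'] from rfl,
      show ("calculate_":String).toList = ['c','a','l','c','u','l','a','t','e'] ++ ['_'] from rfl,
      show ("compute_":String).toList = ['c','o','m','p','u','t','e'] ++ ['_'] from rfl,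
      show ("create_":String).toList = ['c','r','e','a','t','e'] ++ ['_'] from rfl,
      show ("generate_":String).toList = ['g','e','n','e','r','a','t','e'] ++ ['_'] from rfl,
      show ("update_":String).toList = ['u','p','d','a','t','e'] ++ ['_'] from rfl,
      show ("modify_":String).toList = ['m','o','d','i','f','y'] ++ ['_'] from rfl,
      show ("delete_":String).toList = ['d','e','l','e','t','e'] ++ ['_'] from rfl,
      show ("remove_":String).toList = ['r','e','m','o','v','e'] ++ ['_'] from rfl,
      show ("list":String).toList = ['l','i','s','t'] from rfl,
      show ("all":String).toList = ['a','l','l'] from rfl,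
      e1, e2, e3, e4, e5, e6, e7, e8, e9, e10, e11, e12, e13, e14, e15,
      hu, if_true, pvGetWords, pvBoolWords, pvFloatWords, pvDictWords, List.contains_cons,
      List.contains_nil, Bool.or_false]
    set H := cs.takeWhile (fun c => c ≠ '_') with hH
    by_cases h1 : H = ['i','s']
    · simp [h1]
    by_cases h2 : H = ['h','a','s']
    · simp [h2]
    by_cases h3 : H = ['s','h','o','u','l','d']
    · simp [h3]
    by_cases h4 : H = ['c','h','e','c','k']
    · simp [h4]
    by_cases h5 : H = ['g','e','t']
    · simp [h5]
    by_cases h6 : H = ['f','e','t','c','h']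
    · simp [h6]
    by_cases h7 : H = ['r','e','t','r','i','e','v','e']
    · simp [h7]
    by_cases h8 : H = ['c','a','l','c','u','l','a','t','e']
    · simp [h8]
    by_cases h9 : H = ['c','o','m','p','u','t','e']
    · simp [h9]
    by_cases h10 : H = ['c','r','e','a','t','e']
    · simp [h10]
    by_cases h11 : H = ['g','e','n','e','r','a','t','e']
    · simp [h11]
    by_cases h12 : H = ['u','p','d','a','t','e']
    · simp [h12]
    by_cases h13 : H = ['m','o','d','i','f','y']
    · simp [h13]
    by_cases h14 : H = ['d','e','l','e','t','e']
    · simp [h14]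
    by_cases h15 : H = ['r','e','m','o','v','e']
    · simp [h15]
    simp [h1, h2, h3, h4, h5, h6, h7, h8, h9, h10, h11, h12, h13, h14, h15]
  · have f : ∀ (w : List Char), PySem.Chars.startswith cs (w ++ ['_']) = false :=
      fun w => startswith_underscore_false cs w hu
    simp only [
      show ("is_":String).toList = ['i','s'] ++ ['_'] from rfl,
      show ("has_":String).toList = ['h','a','s'] ++ ['_'] from rfl,
      show ("should_":String).toList = ['s','h','o','u','l','d'] ++ ['_'] from rfl,
      show ("check_":String).toList = ['c','h','e','c','k'] ++ ['_'] from rfl,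
      show ("get_":String).toList = ['g','e','t'] ++ ['_'] from rfl,
      show ("fetch_":String).toList = ['f','e','t','c','h'] ++ ['_'] from rfl,
      show ("retrieve_":String).toList = ['r','e','t','r','i','e','v','e'] ++ ['_'] from rfl,
      show ("calculate_":String).toList = ['c','a','l','c','u','l','a','t','e'] ++ ['_'] from rfl,
      show ("compute_":String).toList = ['c','o','m','p','u','t','e'] ++ ['_'] from rfl,
      show ("create_":String).toList = ['c','r','e','a','t','e'] ++ ['_'] from rfl,
      show ("generate_":String).toList = ['g','e','n','e','r','a','t','e'] ++ ['_'] from rfl,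
      show ("update_":String).toList = ['u','p','d','a','t','e'] ++ ['_'] from rfl,
      show ("modify_":String).toList = ['m','o','d','i','f','y'] ++ ['_'] from rfl,
      show ("delete_":String).toList = ['d','e','l','e','t','e'] ++ ['_'] from rfl,
      show ("remove_":String).toList = ['r','e','m','o','v','e'] ++ ['_'] from rfl,
      f, hu]
    simp
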